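-- pv_equiv track=rewrite | github.com/Wizmann/ACM-ICPC | LintCode/python/Kth Prime Number.py | kthPrime
-- ===== SOURCE A (Python) =====
-- def kthPrime(n):
--     primes = [2]
--     cur = 3
--     while primes[-1] < n:
--         is_prime = True
--         for prime in primes:
--             if cur % prime == 0:
--                 is_prime = False
--                 break
--
--             if prime * prime > cur:
--                 break
--         if is_prime:
--             primes.append(cur)
--
--         cur += 2
--     return len(primes)
-- ===== SOURCE B (Python) =====
-- def kthPrime(n):
--     def is_prime(k):
--         d = 2
--         while d * d <= k:
--             if k % d == 0:
--                 return False
--             d += 1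
--         return True
--     count = 1
--     for k in range(2, n):
--         if is_prime(k):
--             count += 1
--     return count
-- ===== Notes on version B (the rewrite author's own statement) =====
-- stated objective: simpler
-- what changed: A grows a dynamic list of primes and trial-divides each odd candidate by it until the list's last prime reaches n; B uses the closed-form characterisation of A's result (number of primes below n, plus one) and directly counts primes in range(2,n) with a self-contained sqrt-bounded trial division, with no primes list and no stop rule.
import Mathlib
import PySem

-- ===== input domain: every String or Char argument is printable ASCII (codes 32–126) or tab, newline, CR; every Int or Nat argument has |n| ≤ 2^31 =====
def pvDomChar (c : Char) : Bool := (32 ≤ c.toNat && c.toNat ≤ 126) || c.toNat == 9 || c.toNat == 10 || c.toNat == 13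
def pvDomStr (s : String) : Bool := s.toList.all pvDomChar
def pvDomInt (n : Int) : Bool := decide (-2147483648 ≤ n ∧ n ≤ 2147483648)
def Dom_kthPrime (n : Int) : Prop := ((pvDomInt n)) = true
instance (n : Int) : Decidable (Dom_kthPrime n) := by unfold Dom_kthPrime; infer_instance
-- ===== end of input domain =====

-- B replaces A's growing primes list and its "stop once the last prime reaches n" loop by a
-- direct count of the primes in range(2, n) (each tested by sqrt-bounded trial division), plus one.

-- ===== PORT A =====
-- the inner `for prime in primes` loop with its two breaks
def checkA (cur : Int) : List Int → Bool
  | [] => true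
  | p :: ps =>
    if cur % p == 0 then false
    else if p * p > cur then true
    else checkA cur ps

-- the `while primes[-1] < n` loop; the fuel argument only makes it total in Lean:
-- lemmas below prove the fuel chosen in `kthPrime` is never exhausted
def loopA (n : Int) : Nat → List Int → Int → List Int
  | 0, primes, _ => primes
  | fuel + 1, primes, cur =>
    match PySem.List.pyGet? primes (-1) with
    | none => primes
    | some last =>
      if last < n then
        loopA n fuel (if checkA cur primes then primes ++ [cur] else primes) (cur + 2)
      else primes

def kthPrime (n : Int) : Int := (loopA n ((max n 3).toNat + 4) [2] 3).length

-- ===== PORT B =====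
-- `while d * d <= k` of is_prime; the counter argument only makes the loop total in Lean
-- (it starts at the loop's maximal possible number of iterations and is never exhausted)
def trialDivN (k : Int) : Nat → Int → Bool
  | 0, _ => true
  | s + 1, d =>
    if d * d ≤ k then
      if k % d == 0 then false else trialDivN k s (d + 1)
    else true

def trialDiv (k : Int) (d : Int) : Bool := trialDivN k (k + 2 - d).toNat d

def kthPrime_alt (n : Int) : Int :=
  (PySem.List.pyRange 2 n 1).foldl (fun count k => if trialDiv k 2 then count + 1 else count) 1

-- ===== PRECONDITION & SPEC =====
def Spec_kthPrime (n : Int) (out : Int) : Prop := out = kthPrime_alt n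
instance (n : Int) (out : Int) : Decidable (Spec_kthPrime n out) := by unfold Spec_kthPrime; infer_instance

-- ===== CLAIM (what is proved, stated in full; the proofs are below) =====
def Claim_equal_kthPrime : Prop := ∀ (n : Int), Dom_kthPrime n → Spec_kthPrime n (kthPrime n)

-- ===== LEMMAS AND PROOFS =====

-- the primes of [2, c), in increasing order
def primesBelow (c : Int) : List Int :=
  (PySem.List.pyRange 2 c 1).filter (fun k => decide (Nat.Prime k.toNat))

theorem mem_primesBelow {c q : Int} :
    q ∈ primesBelow c ↔ 2 ≤ q ∧ q < c ∧ Nat.Prime q.toNat := by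
  simp [primesBelow, List.mem_filter, PySem.List.mem_pyRange_one, and_assoc]

theorem pairwise_primesBelow (c : Int) : (primesBelow c).Pairwise (· < ·) :=
  (PySem.List.pairwise_lt_pyRange_one 2 c).filter _

theorem int_dvd_iff_toNat {a b : Int} (ha : 0 ≤ a) (hb : 0 ≤ b) :
    a ∣ b ↔ a.toNat ∣ b.toNat := by
  rw [← Int.natCast_dvd_natCast, Int.toNat_of_nonneg ha, Int.toNat_of_nonneg hb]

-- ## B-side: trialDiv is primality

theorem trialDivN_iff (k : Int) : ∀ (s : Nat) (d : Int), 2 ≤ d → (k + 2 - d).toNat ≤ s →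
    (trialDivN k s d = true ↔ ∀ e : Int, d ≤ e → e * e ≤ k → ¬ e ∣ k) := by
  intro s
  induction s with
  | zero =>
    intro d hd hb
    refine iff_of_true rfl ?_
    intro e he hsq
    exfalso
    have h1 : 0 ≤ e * (e - 2) := mul_nonneg (by omega) (by omega)
    have h2 : e * e - 2 * e = e * (e - 2) := by ring
    omega
  | succ s ih =>
    intro d hd hb
    simp only [trialDivN]
    by_cases h1 : d * d ≤ k
    · have hdk : d ≤ k := by
        by_cases hle : d ≤ 0
        · have := mul_self_nonneg d; omega
        · have : d ≤ d * d := le_mul_of_one_le_right (by omega) (by omega)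
          omega
      rw [if_pos h1]
      by_cases h2 : k % d = 0
      · rw [if_pos (by simpa using h2)]
        exact iff_of_false (by simp) fun h => h d le_rfl h1 (Int.dvd_iff_emod_eq_zero.mpr h2)
      · rw [if_neg (by simpa using h2), ih (d + 1) (by omega) (by omega)]
        constructor
        · intro h e he hsq
          rcases eq_or_lt_of_le he with rfl | hlt
          · intro hdvd
            exact h2 ((Int.dvd_iff_emod_eq_zero).mp hdvd)
          · exact h e (by omega) hsq
        · intro h e he hsq
          exact h e (by omega) hsq
    · rw [if_neg h1]
      refine iff_of_true rfl ?_
      intro e he hsq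
      exfalso
      apply h1
      calc d * d ≤ e * e := by
            have h3 : 0 ≤ (e - d) * (e + d) := mul_nonneg (by omega) (by omega)
            have h4 : e * e - d * d = (e - d) * (e + d) := by ring
            omega
        _ ≤ k := hsq

theorem trialDiv_iff (k : Int) (d : Int) :
    2 ≤ d → (trialDiv k d = true ↔ ∀ e : Int, d ≤ e → e * e ≤ k → ¬ e ∣ k) := by
  intro hd
  exact trialDivN_iff k (k + 2 - d).toNat d hd le_rfl

theorem trialDiv_prime (k : Int) (hk : 2 ≤ k) :
    trialDiv k 2 = true ↔ Nat.Prime k.toNat := by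
  have hkN : (k.toNat : Int) = k := Int.toNat_of_nonneg (by omega)
  rw [trialDiv_iff k 2 (le_refl _), Nat.prime_def_le_sqrt]
  constructor
  · intro h
    refine ⟨by omega, fun m hm hsq => ?_⟩
    rw [Nat.le_sqrt] at hsq
    intro hdvd
    apply h (m : Int) (by exact_mod_cast hm) (by rw [← hkN]; exact_mod_cast hsq)
    rw [← hkN]
    exact Int.natCast_dvd_natCast.mpr hdvd
  · rintro ⟨-, h⟩ e he hsq hdvd
    have he0 : 0 ≤ e := by omega
    have heN : (e.toNat : Int) = e := Int.toNat_of_nonneg he0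
    apply h e.toNat (by omega)
      (Nat.le_sqrt.mpr (by rw [← @Nat.cast_le Int]; push_cast; rw [heN, hkN]; exact hsq))
    exact (int_dvd_iff_toNat he0 (by omega)).mp hdvd

theorem kthPrime_alt_eq (n : Int) : kthPrime_alt n = 1 + (primesBelow n).length := by
  unfold kthPrime_alt primesBelow
  rw [PySem.List.foldl_count_if (fun k => trialDiv k 2) _ 1, List.countP_eq_length_filter]
  have hfc : List.filter (fun k => trialDiv k 2) (PySem.List.pyRange 2 n 1) =
      List.filter (fun k => decide (Nat.Prime k.toNat)) (PySem.List.pyRange 2 n 1) := by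
    apply List.filter_congr
    intro k hk
    have hk2 : 2 ≤ k := (PySem.List.mem_pyRange_one.mp hk).1
    have h := trialDiv_prime k hk2
    by_cases hp : Nat.Prime k.toNat
    · simp [h.mpr hp, hp]
    · have h2 : trialDiv k 2 = false := Bool.eq_false_iff.mpr (fun hc => hp (h.mp hc))
      simp [h2, hp]
  rw [hfc]

-- ## A-side: checkA on a full list of smaller primes is primality

theorem checkA_true {cur : Int} {l : List Int} (h : ∀ p ∈ l, ¬ cur % p = 0) :
    checkA cur l = true := by
  induction l with
  | nil => rfl
  | cons p ps ih =>
    have := h p (List.mem_cons_self ..)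
    simp only [checkA, beq_iff_eq, if_neg this]
    split
    · rfl
    · exact ih fun q hq => h q (List.mem_cons_of_mem _ hq)

theorem checkA_false {cur q : Int} {l : List Int}
    (hpw : l.Pairwise (· < ·)) (hall : ∀ p ∈ l, Nat.Prime p.toNat)
    (hmem : q ∈ l) (hq2 : 2 ≤ q) (hdvd : cur % q = 0) (hsq : q * q ≤ cur) :
    checkA cur l = false := by
  induction l with
  | nil => cases hmem
  | cons h t ih =>
    have hstep : checkA cur (h :: t) =
        if cur % h == 0 then false else if h * h > cur then true else checkA cur t := rfl
    rw [hstep]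
    by_cases hdh : cur % h = 0
    · simp [hdh]
    · have hne : h ≠ q := fun e => hdh (e ▸ hdvd)
      have hmem' : q ∈ t := by
        rcases List.mem_cons.mp hmem with rfl | hq
        · exact absurd rfl hne
        · exact hq
      have hlt : h < q := (List.pairwise_cons.mp hpw).1 q hmem'
      have hh2 : 2 ≤ h := by
        have := (hall h (List.mem_cons_self ..)).two_le
        omega
      have hnb : ¬ (h * h > cur) := by nlinarith
      rw [if_neg (by simpa using hdh), if_neg hnb]
      exact ih (List.pairwise_cons.mp hpw).2 (fun p hp => hall p (List.mem_cons_of_mem _ hp))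
        hmem' 

theorem checkA_primesBelow {cur : Int} (h3 : 3 ≤ cur) :
    checkA cur (primesBelow cur) = true ↔ Nat.Prime cur.toNat := by
  constructor
  · intro htrue
    by_contra hnp
    have hpos : 0 < cur.toNat := by omega
    have hq_p : Nat.Prime cur.toNat.minFac := Nat.minFac_prime (by omega)
    have hq_dvd : cur.toNat.minFac ∣ cur.toNat := Nat.minFac_dvd _
    have hq_sq : cur.toNat.minFac * cur.toNat.minFac ≤ cur.toNat := by
      have h := Nat.minFac_sq_le_self hpos hnp
      rw [pow_two] at h
      exact h
    have hq2 : 2 ≤ cur.toNat.minFac := hq_p.two_le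
    have hqlt : cur.toNat.minFac < cur.toNat := by nlinarith
    set q : Int := (cur.toNat.minFac : Int) with hqdef
    have hq2I : (2 : Int) ≤ q := by omega
    have hqcur : q < cur := by omega
    have hqdvdI : q ∣ cur := by
      rw [int_dvd_iff_toNat (by omega) (by omega)]
      simpa using hq_dvd
    have hmod : cur % q = 0 := Int.dvd_iff_emod_eq_zero.mp hqdvdI
    have hcN : (cur.toNat : Int) = cur := by omega
    have hsqI : q * q ≤ cur := by
      rw [hqdef, ← hcN]
      exact_mod_cast hq_sq
    have hfalse := checkA_false (pairwise_primesBelow cur)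
      (fun p hp => (mem_primesBelow.mp hp).2.2)
      (mem_primesBelow.mpr ⟨hq2I, hqcur, by rw [hqdef, Int.toNat_natCast]; exact hq_p⟩) hq2I hmod hsqI
    rw [hfalse] at htrue
    exact Bool.false_ne_true htrue
  · intro hp
    apply checkA_true
    intro p hpmem hmod
    obtain ⟨hp2, hplt, hpp⟩ := mem_primesBelow.mp hpmem
    have hdvd : p ∣ cur := Int.dvd_iff_emod_eq_zero.mpr hmod
    have : p.toNat ∣ cur.toNat := (int_dvd_iff_toNat (by omega) (by omega)).mp hdvd
    rcases hp.eq_one_or_self_of_dvd p.toNat this with h1 | h1 <;> omega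

-- ## primesBelow bookkeeping

theorem primesBelow_step {cur : Int} (h3 : 3 ≤ cur) (hodd : cur % 2 = 1) :
    primesBelow (cur + 2) =
      primesBelow cur ++ (if Nat.Prime cur.toNat then [cur] else []) := by
  unfold primesBelow
  rw [PySem.List.pyRange_one_append 2 cur (cur + 2) (by omega) (by omega), List.filter_append]
  congr 1
  have hr : PySem.List.pyRange cur (cur + 2) 1 = [cur, cur + 1] := by
    rw [PySem.List.pyRange_one_cons (by omega),
      show cur + 2 = (cur + 1) + 1 by ring, PySem.List.pyRange_one_singleton]
  have hnot : ¬ Nat.Prime (cur + 1).toNat := by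
    intro hp
    rcases hp.eq_two_or_odd with h2 | hodd' <;> omega
  rw [hr]
  by_cases hp : Nat.Prime cur.toNat <;> simp [List.filter, hp, hnot]

theorem getLast_max {l : List Int} (hpw : l.Pairwise (· < ·)) (hne : l ≠ []) :
    ∃ L, l.getLast? = some L ∧ L ∈ l ∧ ∀ x ∈ l, x ≤ L := by
  induction l with
  | nil => exact absurd rfl hne
  | cons a t ih =>
    cases t with
    | nil => exact ⟨a, rfl, by simp, by simp⟩
    | cons b t' =>
      obtain ⟨L, hL, hmem, hmax⟩ := ih (List.pairwise_cons.mp hpw).2 (by simp)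
      refine ⟨L, by simpa using hL, List.mem_cons_of_mem _ hmem, ?_⟩
      intro x hx
      rcases List.mem_cons.mp hx with rfl | hx'
      · exact le_of_lt ((List.pairwise_cons.mp hpw).1 L hmem)
      · exact hmax x hx' 

theorem primesBelow_ne_nil {c : Int} (h3 : 3 ≤ c) : primesBelow c ≠ [] := by
  intro h
  have : (2 : Int) ∈ primesBelow c := mem_primesBelow.mpr ⟨le_refl _, by omega, by decide⟩
  simp [h] at this

-- ## the main loop

theorem loopA_exit {n Q : Int} (fuel : Nat) (cur : Int) (h3 : 3 ≤ Q)
    (hQp : Nat.Prime Q.toNat) (hnQ : n ≤ Q) :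
    loopA n fuel (primesBelow (Q + 2)) cur = primesBelow (Q + 2) := by
  cases fuel with
  | zero => rfl
  | succ f =>
    obtain ⟨L, hL, hmem, hmax⟩ :=
      getLast_max (pairwise_primesBelow (Q + 2)) (primesBelow_ne_nil (by omega))
    have hQmem : Q ∈ primesBelow (Q + 2) := mem_primesBelow.mpr ⟨by omega, by omega, hQp⟩
    have hnL : ¬ L < n := by have := hmax Q hQmem; omega
    simp only [loopA, PySem.List.pyGet?_neg_one, hL, if_neg hnL]

theorem loopA_run {n Q : Int} (hQp : Nat.Prime Q.toNat) (hQodd : Q % 2 = 1)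
    (hnQ : n ≤ Q) (hleast : ∀ p : Int, 2 ≤ p → Nat.Prime p.toNat → n ≤ p → Q ≤ p) :
    ∀ (fuel : Nat) (cur : Int), 3 ≤ cur → cur % 2 = 1 → cur ≤ Q →
    Q + 2 ≤ cur + 2 * (fuel : Int) →
    loopA n fuel (primesBelow cur) cur = primesBelow (Q + 2) := by
  intro fuel
  induction fuel with
  | zero => intro cur h3 hodd hle hbound; exfalso; simp at hbound; omega
  | succ f ih =>
    intro cur h3 hodd hle hbound
    obtain ⟨L, hL, hmem, hmax⟩ :=
      getLast_max (pairwise_primesBelow cur) (primesBelow_ne_nil h3)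
    obtain ⟨hL2, hLcur, hLp⟩ := mem_primesBelow.mp hmem
    have hLn : L < n := by
      by_contra hc
      have := hleast L hL2 hLp (by omega)
      omega
    have hstep := primesBelow_step h3 hodd
    have hcheck := checkA_primesBelow h3
    simp only [loopA, PySem.List.pyGet?_neg_one, hL, if_pos hLn]
    by_cases hp : Nat.Prime cur.toNat
    · rw [hcheck.mpr hp, if_pos rfl]
      have hnew : primesBelow cur ++ [cur] = primesBelow (cur + 2) := by
        rw [hstep, if_pos hp]
      rw [hnew]
      rcases eq_or_lt_of_le hle with rfl | hlt
      · exact loopA_exit f (cur + 2) (by omega) hQp hnQ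
      · exact ih (cur + 2) (by omega) (by omega) (by omega) (by push_cast at hbound ⊢; omega)
    · have hfalse : checkA cur (primesBelow cur) = false := by
        rcases Bool.eq_false_or_eq_true (checkA cur (primesBelow cur)) with h | h
        · exact absurd (hcheck.mp h) hp
        · exact h
      rw [hfalse, if_neg Bool.false_ne_true]
      have hnew : primesBelow cur = primesBelow (cur + 2) := by
        rw [hstep, if_neg hp, List.append_nil]
      have hcurQ : cur ≠ Q := by
        rintro rfl
        exact hp hQp
      rw [hnew]
      exact ih (cur + 2) (by omega) (by omega) (by omega) (by push_cast at hbound ⊢; omega)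

-- ===== VERDICT (by name: the statement is the Claim_ definition above) =====
theorem kthPrime_spec : Claim_equal_kthPrime := by
  intro n _
  show kthPrime n = kthPrime_alt n
  rw [kthPrime_alt_eq]
  unfold kthPrime
  by_cases hn : n ≤ 2
  · have h1 : primesBelow n = [] := by
      unfold primesBelow
      rw [PySem.List.pyRange_one_eq_nil (by omega)]
      rfl
    obtain ⟨f, hf⟩ : ∃ f, (max n 3).toNat + 4 = f + 1 := ⟨(max n 3).toNat + 3, by omega⟩
    rw [hf]
    have hget : PySem.List.pyGet? ([2] : List Int) (-1) = some 2 := by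
      rw [PySem.List.pyGet?_neg_one]; rfl
    simp only [loopA, hget, if_neg (show ¬ (2 : Int) < n by omega)]
    simp [h1]
  · have h3n : 3 ≤ n := by omega
    have hex : ∃ p : ℕ, Nat.Prime p ∧ n.toNat ≤ p := by
      obtain ⟨p, hp1, hp2⟩ := Nat.exists_infinite_primes n.toNat
      exact ⟨p, hp2, hp1⟩
    obtain ⟨hQ'p, hQ'ge⟩ := Nat.find_spec hex
    set Q' := Nat.find hex with hQ'def
    set Q : Int := (Q' : Int) with hQdef
    have hQ3 : 3 ≤ Q := by omega
    have hQodd : Q % 2 = 1 := by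
      rcases hQ'p.eq_two_or_odd with h2 | hodd <;> omega
    have hQp : Nat.Prime Q.toNat := by rw [hQdef, Int.toNat_natCast]; exact hQ'p
    have hnQ : n ≤ Q := by omega
    have hleast : ∀ p : Int, 2 ≤ p → Nat.Prime p.toNat → n ≤ p → Q ≤ p := by
      intro p hp2 hpp hnp
      have h := Nat.find_min' hex ⟨hpp, by omega⟩
      omega
    obtain ⟨b, hbp, hb1, hb2⟩ := Nat.exists_prime_lt_and_le_two_mul n.toNat (by omega)
    have hQb : Q' ≤ b := Nat.find_min' hex ⟨hbp, by omega⟩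
    have hinit : ([2] : List Int) = primesBelow 3 := by
      unfold primesBelow
      rw [show (3 : Int) = 2 + 1 from rfl, PySem.List.pyRange_one_singleton]
      rfl
    have hrun := loopA_run hQp hQodd hnQ hleast ((max n 3).toNat + 4) 3
      (by omega) (by omega) hQ3 (by push_cast; omega)
    rw [hinit, hrun]
    have hQ1not : ¬ Nat.Prime (Q + 1).toNat := by
      intro hpp
      rcases hpp.eq_two_or_odd with h2 | hodd <;> omega
    have hdecomp : primesBelow (Q + 2) = primesBelow n ++ [Q] := by
      unfold primesBelow
      rw [PySem.List.pyRange_one_append 2 n (Q + 2) (by omega) (by omega), List.filter_append]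
      congr 1
      rw [PySem.List.pyRange_one_append n Q (Q + 2) (by omega) (by omega), List.filter_append]
      have hmid : PySem.List.pyRange Q (Q + 2) 1 = [Q, Q + 1] := by
        rw [PySem.List.pyRange_one_cons (by omega), show Q + 2 = (Q + 1) + 1 by ring,
          PySem.List.pyRange_one_singleton]
      have hnil : List.filter (fun k => decide (Nat.Prime k.toNat))
          (PySem.List.pyRange n Q 1) = [] := by
        rw [List.filter_eq_nil_iff]
        intro p hpmem
        obtain ⟨hp1, hp2⟩ := PySem.List.mem_pyRange_one.mp hpmem
        simp only [decide_eq_true_eq]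
        intro hpp
        have := hleast p (by omega) hpp hp1
        omega
      rw [hnil, hmid]
      simp [List.filter, hQp, hQ1not]
    rw [hdecomp]
    simp [List.length_append]
    omega
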